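-- pv_equiv track=rewrite | github.com/DhruvGorasiya/apollo | fetch_contacts.py | group_contacts_by_organization
-- ===== SOURCE A (Python) =====
-- def group_contacts_by_organization(contacts: list[dict]) -> dict[str, list[dict]]:
--     """Group contacts by organization_name. Key = company name, value = list of contacts."""
--     by_org: dict[str, list[dict]] = {}
--     for c in contacts:
--         org = c.get("organization_name") or "Unknown"
--         if org not in by_org:
--             by_org[org] = []
--         by_org[org].append(c)
--     return by_org
-- ===== SOURCE B (Python) =====
-- def group_contacts_by_organization(contacts: list[dict]) -> dict[str, list[dict]]:
--     """Group contacts by organization_name. Key = company name, value = list of contacts."""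
--     def key(c):
--         return c.get("organization_name") or "Unknown"
--     orgs = dict.fromkeys(key(c) for c in contacts)
--     return {org: [c for c in contacts if key(c) == org] for org in orgs}
-- ===== Notes on version B (the rewrite author's own statement) =====
-- stated objective: alternative
-- what changed: Instead of building the grouped dict incrementally in one pass with a membership check and in-place appends, B first collects the distinct organization keys in first-occurrence order with dict.fromkeys and then builds each group by a comprehension filtering the contact list per key.
import Mathlib
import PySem

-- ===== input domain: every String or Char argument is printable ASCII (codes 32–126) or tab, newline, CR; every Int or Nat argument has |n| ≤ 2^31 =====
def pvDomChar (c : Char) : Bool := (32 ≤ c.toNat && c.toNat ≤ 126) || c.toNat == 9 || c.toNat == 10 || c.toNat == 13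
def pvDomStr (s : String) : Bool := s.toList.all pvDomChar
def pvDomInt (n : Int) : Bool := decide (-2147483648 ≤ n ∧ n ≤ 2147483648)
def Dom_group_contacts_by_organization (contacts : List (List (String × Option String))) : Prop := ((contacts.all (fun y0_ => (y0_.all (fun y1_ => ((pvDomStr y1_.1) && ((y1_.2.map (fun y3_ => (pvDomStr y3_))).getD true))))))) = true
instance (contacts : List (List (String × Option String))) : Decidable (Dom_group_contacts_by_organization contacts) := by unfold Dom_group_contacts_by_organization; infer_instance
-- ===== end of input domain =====

-- B restructures A: instead of one incremental dict-building pass, it dedups the org keys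
-- and builds each group by filtering the contact list per key (same return value; no side effects either way).

-- org = c.get("organization_name") or "Unknown"  (None, missing key and "" are all falsy)
def pvOrgKey (c : List (String × Option String)) : String :=
  match (PySem.Dict.mk c).get? "organization_name" with
  | some (some s) => if s = "" then "Unknown" else s
  | _ => "Unknown"

-- ===== PORT A =====
def group_contacts_by_organization (contacts : List (List (String × Option String))) : List (String × List (List (String × Option String))) :=
  (contacts.foldl
    (fun by_org c =>
      let org := pvOrgKey c
      let by_org := if by_org.contains org then by_org else by_org.insert org []
      by_org.modify org [] (fun l => l ++ [c]))
    PySem.Dict.empty).items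

-- ===== PORT B =====
def group_contacts_by_organization_alt (contacts : List (List (String × Option String))) : List (String × List (List (String × Option String))) :=
  let orgs := PySem.List.dedup (contacts.map pvOrgKey)
  orgs.map (fun org => (org, contacts.filter (fun c => pvOrgKey c == org)))

-- ===== PRECONDITION & SPEC =====
def Spec_group_contacts_by_organization (contacts : List (List (String × Option String))) (out : List (String × List (List (String × Option String)))) : Prop := out = group_contacts_by_organization_alt contacts
instance (contacts : List (List (String × Option String))) (out : List (String × List (List (String × Option String)))) : Decidable (Spec_group_contacts_by_organization contacts out) := by unfold Spec_group_contacts_by_organization; infer_instance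

-- ===== CLAIM (what is proved, stated in full; the proofs are below) =====
def Claim_equal_group_contacts_by_organization : Prop := ∀ (contacts : List (List (String × Option String))), Dom_group_contacts_by_organization contacts → Spec_group_contacts_by_organization contacts (group_contacts_by_organization contacts)

-- ===== LEMMAS AND PROOFS =====

-- A's "ensure key then append" step is exactly a modify with default [].
theorem pv_stepA_eq (d : PySem.Dict String (List (List (String × Option String))))
    (c : List (String × Option String)) :
    (if d.contains (pvOrgKey c) then d else d.insert (pvOrgKey c) []).modify (pvOrgKey c) []
      (fun l => l ++ [c]) = d.modify (pvOrgKey c) [] (fun l => l ++ [c]) := by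
  by_cases h : d.contains (pvOrgKey c)
  · simp [h]
  · simp only [h, if_neg, Bool.not_eq_true, PySem.Dict.modify]
    rw [PySem.Dict.getD_insert_self, PySem.Dict.insert_insert_self]
    rw [PySem.Dict.getD_of_not_contains (h := by simpa using h)]

theorem group_contacts_by_organization_eq (contacts : List (List (String × Option String))) :
    group_contacts_by_organization contacts = group_contacts_by_organization_alt contacts := by
  unfold group_contacts_by_organization group_contacts_by_organization_alt
  have hstep : (fun (by_org : PySem.Dict String (List (List (String × Option String)))) c =>
      let org := pvOrgKey c
      let by_org := if by_org.contains org then by_org else by_org.insert org []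
      by_org.modify org [] (fun l => l ++ [c]))
      = fun d c => d.modify (pvOrgKey c) [] (fun l => l ++ [c]) := by
    funext d c
    exact pv_stepA_eq d c
  rw [hstep]
  have hnd : (contacts.foldl (fun d c => d.modify (pvOrgKey c) [] (fun l => l ++ [c]))
      PySem.Dict.empty).keys.Nodup :=
    PySem.Dict.nodup_keys_foldl_modify_key contacts pvOrgKey [] _ PySem.Dict.empty (by simp)
  rw [PySem.Dict.items_eq_map_keys _ hnd []]
  rw [PySem.Dict.keys_foldl_modify_key]
  simp only [PySem.Dict.keys_empty, PySem.Set.update_nil_left, PySem.List.dedup_eq_ofList]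
  apply List.map_congr_left
  intro org _
  congr 1
  have hmap : contacts.foldl (fun d c => d.modify (pvOrgKey c) [] (fun l => l ++ [c]))
      PySem.Dict.empty
      = (contacts.map (fun c => (pvOrgKey c, c))).foldl
          (fun d p => d.modify p.1 [] (fun l => l ++ [p.2])) PySem.Dict.empty := by
    rw [List.foldl_map]
  rw [hmap, PySem.Dict.getD_foldl_modify_append]
  simp [List.filter_map, Function.comp_def]

-- ===== VERDICT (by name: the statement is the Claim_ definition above) =====
theorem group_contacts_by_organization_spec : Claim_equal_group_contacts_by_organization := by
  intro contacts _
  exact group_contacts_by_organization_eq contacts
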